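-- pv_equiv track=rewrite | github.com/dice-group/dice-embeddings | bbox_poisoning/prune_global.py | greedy_pick_disconnected_hubs
-- ===== SOURCE A (Python) =====
-- import collections
-- from typing import Dict, List, Sequence, Tuple, Set, Optional, Deque
--
-- Triple = Tuple[str, str, str]  # (head, relation, tail)
--
-- def unordered_pair(u: str, v: str) -> Tuple[str, str]:
--     return (u, v) if u <= v else (v, u)
--
-- def greedy_pick_disconnected_hubs(
--     triples: Sequence[Triple],
--     candidate_hubs: List[str],
--     final_k: int,
-- ) -> List[str]:
--     """
--     Greedy heuristic:
--       - start with the best-scoring hub (first in candidate_hubs)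
--       - repeatedly add the hub that adds the fewest hub-hub edges to the current set
--         (ties broken by original candidate order)
--     """
--     if final_k >= len(candidate_hubs):
--         return candidate_hubs[:]
--
--     cand_order = {h: i for i, h in enumerate(candidate_hubs)}
--     selected: List[str] = [candidate_hubs[0]]
--     selected_set = {selected[0]}
--
--     # Precompute hub-hub adjacency counts between candidates
--     pair_count = collections.Counter()
--     cand_set = set(candidate_hubs)
--     for (h, _, t) in triples:
--         if h in cand_set and t in cand_set and h != t:
--             pair_count[unordered_pair(h, t)] += 1
--
--     while len(selected) < final_k:
--         best = None
--         best_added = None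
--         for h in candidate_hubs:
--             if h in selected_set:
--                 continue
--             added = 0
--             for s in selected:
--                 added += pair_count.get(unordered_pair(h, s), 0)
--             if best is None or added < best_added or (added == best_added and cand_order[h] < cand_order[best]):
--                 best = h
--                 best_added = added
--         selected.append(best)
--         selected_set.add(best)
--
--     return selected
-- ===== SOURCE B (Python) =====
-- import collections
-- from typing import Dict, List, Sequence, Tuple, Set, Optional, Deque
--
-- Triple = Tuple[str, str, str]
--
-- def unordered_pair(u: str, v: str) -> Tuple[str, str]:
--     return (u, v) if u <= v else (v, u)
--
-- def greedy_pick_disconnected_hubs(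
--     triples: Sequence[Triple],
--     candidate_hubs: List[str],
--     final_k: int,
-- ) -> List[str]:
--     """Same greedy selection, but each remaining candidate carries a RUNNING total
--     of hub-hub edges to the current selection, updated once per new selection,
--     instead of being recomputed from scratch every round."""
--     if final_k >= len(candidate_hubs):
--         return candidate_hubs[:]
--
--     order = {h: i for i, h in enumerate(candidate_hubs)}
--     cand_set = set(candidate_hubs)
--     pair_count = collections.Counter()
--     for (h, _, t) in triples:
--         if h in cand_set and t in cand_set and h != t:
--             pair_count[unordered_pair(h, t)] += 1
--
--     first = candidate_hubs[0]
--     selected = [first]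
--     # remaining distinct candidates with running added-edge counts w.r.t. selected
--     rem = [(h, pair_count.get(unordered_pair(h, first), 0))
--            for h in dict.fromkeys(candidate_hubs) if h != first]
--
--     while len(selected) < final_k:
--         if not rem:
--             break  # no distinct candidates left
--         best, _ = min(rem, key=lambda e: (e[1], order[e[0]]))
--         selected.append(best)
--         rem = [(h, c + pair_count.get(unordered_pair(h, best), 0))
--                for (h, c) in rem if h != best]
--
--     return selected
-- ===== Notes on version B (the rewrite author's own statement) =====
-- stated objective: faster
-- what changed: B keeps a running added-edge total for every remaining candidate and updates it once per new selection (then takes a min over the remaining list), instead of A's per-round rescan of all candidates with an inner loop re-summing pair counts over the whole current selection.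
-- outside the precondition, e.g. on greedy_pick_disconnected_hubs([], ['a', 'a', 'a'], 2): A returns ['a', None], B returns ['a']; on greedy_pick_disconnected_hubs([], [], -1): A raises IndexError, B raises IndexError
import Mathlib
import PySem

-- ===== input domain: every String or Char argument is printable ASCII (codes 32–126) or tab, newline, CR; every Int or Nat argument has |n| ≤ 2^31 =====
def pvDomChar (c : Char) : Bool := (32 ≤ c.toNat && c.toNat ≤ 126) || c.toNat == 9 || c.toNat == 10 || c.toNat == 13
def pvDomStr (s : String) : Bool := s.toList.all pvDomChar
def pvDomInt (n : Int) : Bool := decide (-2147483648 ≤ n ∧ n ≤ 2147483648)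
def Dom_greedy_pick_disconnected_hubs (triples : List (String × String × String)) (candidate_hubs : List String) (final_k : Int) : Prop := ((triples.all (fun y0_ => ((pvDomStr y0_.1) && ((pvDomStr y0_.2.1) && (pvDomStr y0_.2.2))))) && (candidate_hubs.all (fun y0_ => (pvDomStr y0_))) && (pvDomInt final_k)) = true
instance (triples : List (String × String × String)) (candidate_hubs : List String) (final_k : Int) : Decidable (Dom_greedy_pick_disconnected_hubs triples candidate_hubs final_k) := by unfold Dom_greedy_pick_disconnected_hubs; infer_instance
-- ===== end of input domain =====

-- B replaces A's per-round recomputation of every candidate's added-edge count (an inner loop over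
-- the whole current selection, every round) by a running total per remaining candidate updated once
-- per new selection (fewer pair-count lookups per round); return values proven equal on Pre_.

-- shared module-level helper (unordered_pair) and the identical precompute both Pythons perform
def pvPair (u v : String) : String × String := if u ≤ v then (u, v) else (v, u)

def pvOrder (candidate_hubs : List String) : PySem.Dict String Int :=
  (PySem.List.enumerate candidate_hubs).foldl (fun d p => d.insert p.2 p.1) PySem.Dict.empty

def pvPairCount (triples : List (String × String × String)) (candidate_hubs : List String) :
    PySem.Dict (String × String) Int :=
  let cand_set : PySem.Set String := PySem.Set.ofList candidate_hubs
  triples.foldl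
    (fun pc t =>
      if PySem.Set.contains cand_set t.1 && PySem.Set.contains cand_set t.2.2 && t.1 != t.2.2
      then pc.modify (pvPair t.1 t.2.2) 0 (· + 1) else pc)
    PySem.Dict.empty

-- ===== PORT A =====
def pvALoop (candidate_hubs : List String) (order : PySem.Dict String Int)
    (pc : PySem.Dict (String × String) Int) :
    Nat → List String → PySem.Set String → List String
  | 0, selected, _ => selected
  | fuel + 1, selected, selset =>
    let best :=
      candidate_hubs.foldl
        (fun (st : Option (String × Int)) h =>
          if PySem.Set.contains selset h then st
          else
            let added := selected.foldl (fun acc s => acc + pc.getD (pvPair h s) 0) 0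
            match st with
            | none => some (h, added)
            | some (b, ba) =>
              if added < ba ∨ (added = ba ∧ order.getD h 0 < order.getD b 0) then some (h, added)
              else some (b, ba))
        none
    match best with
    | none => selected
    | some (b, _) =>
      pvALoop candidate_hubs order pc fuel (selected ++ [b]) (PySem.Set.add selset b)

def greedy_pick_disconnected_hubs (triples : List (String × String × String))
    (candidate_hubs : List String) (final_k : Int) : List String :=
  if (candidate_hubs.length : Int) ≤ final_k then candidate_hubs
  else
    match candidate_hubs with
    | [] => []   -- Python raises IndexError here (final_k < 0); outside Pre_
    | c0 :: _ =>
      pvALoop candidate_hubs (pvOrder candidate_hubs) (pvPairCount triples candidate_hubs)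
        (final_k - 1).toNat [c0] (PySem.Set.add PySem.Set.empty c0)

-- ===== PORT B =====
def pvBLoop (order : PySem.Dict String Int) (pc : PySem.Dict (String × String) Int) :
    Nat → List String → List (String × Int) → List String
  | 0, selected, _ => selected
  | fuel + 1, selected, rem =>
    match PySem.List.min2? rem (fun e => e.2) (fun e => order.getD e.1 0) with
    | none => selected
    | some (b, _) =>
      pvBLoop order pc fuel (selected ++ [b])
        ((rem.filter (fun e => e.1 != b)).map (fun e => (e.1, e.2 + pc.getD (pvPair e.1 b) 0)))

def greedy_pick_disconnected_hubs_alt (triples : List (String × String × String))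
    (candidate_hubs : List String) (final_k : Int) : List String :=
  if (candidate_hubs.length : Int) ≤ final_k then candidate_hubs
  else
    match candidate_hubs with
    | [] => []   -- Python raises IndexError here (final_k < 0); outside Pre_
    | c0 :: _ =>
      let pc := pvPairCount triples candidate_hubs
      pvBLoop (pvOrder candidate_hubs) pc (final_k - 1).toNat [c0]
        (((PySem.List.dedup candidate_hubs).filter (fun h => h != c0)).map
          (fun h => (h, pc.getD (pvPair h c0) 0)))

-- ===== PRECONDITION & SPEC =====
-- Pre_ excludes only inputs on which A does not return a proper List[str]: an empty candidate list
-- with final_k < 0 (IndexError), and duplicate-heavy candidate lists with final_k above the number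
-- of DISTINCT candidates but below the list length, where A runs out of fresh candidates and
-- appends None (or crashes comparing None on the following round).
def Pre_greedy_pick_disconnected_hubs (triples : List (String × String × String))
    (candidate_hubs : List String) (final_k : Int) : Prop :=
  (candidate_hubs.length : Int) ≤ final_k ∨
    (candidate_hubs ≠ [] ∧ final_k ≤ ((PySem.List.dedup candidate_hubs).length : Int))
instance (triples : List (String × String × String)) (candidate_hubs : List String) (final_k : Int) : Decidable (Pre_greedy_pick_disconnected_hubs triples candidate_hubs final_k) := by unfold Pre_greedy_pick_disconnected_hubs; infer_instance

def pvWitness_greedy_pick_disconnected_hubs : (List (String × String × String)) × List String × Int :=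
  ([("a", "r", "b"), ("b", "r", "c")], ["a", "b", "c"], 2)

def Spec_greedy_pick_disconnected_hubs (triples : List (String × String × String)) (candidate_hubs : List String) (final_k : Int) (out : List String) : Prop := out = greedy_pick_disconnected_hubs_alt triples candidate_hubs final_k
instance (triples : List (String × String × String)) (candidate_hubs : List String) (final_k : Int) (out : List String) : Decidable (Spec_greedy_pick_disconnected_hubs triples candidate_hubs final_k out) := by unfold Spec_greedy_pick_disconnected_hubs; infer_instance

-- ===== CLAIM (what is proved, stated in full; the proofs are below) =====
def Claim_equal_greedy_pick_disconnected_hubs : Prop := ∀ (triples : List (String × String × String)) (candidate_hubs : List String) (final_k : Int), Dom_greedy_pick_disconnected_hubs triples candidate_hubs final_k → Pre_greedy_pick_disconnected_hubs triples candidate_hubs final_k → Spec_greedy_pick_disconnected_hubs triples candidate_hubs final_k (greedy_pick_disconnected_hubs triples candidate_hubs final_k)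

-- ===== LEMMAS AND PROOFS =====

-- proof-only abbreviations: the per-candidate "added hub-hub edges" sum and the strict
-- lexicographic "better candidate" order that A's scan and B's min both realize
def pvAdded (pc : PySem.Dict (String × String) Int) (sel : List String) (h : String) : Int :=
  sel.foldl (fun acc s => acc + pc.getD (pvPair h s) 0) 0
def pvOrd (order : PySem.Dict String Int) (h : String) : Int := order.getD h 0
def pvLt (order : PySem.Dict String Int) (p q : String × Int) : Prop :=
  p.2 < q.2 ∨ (p.2 = q.2 ∧ pvOrd order p.1 < pvOrd order q.1)
def pvGmin (order : PySem.Dict String Int) (st : Option (String × Int)) (x : String × Int) :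
    Option (String × Int) :=
  match st with
  | none => some x
  | some m =>
    if (decide (x.2 < m.2) || !decide (m.2 < x.2) && decide (pvOrd order x.1 < pvOrd order m.1)) = true
    then some x else some m

lemma pvMin2_eq_fold (order : PySem.Dict String Int) (xs : List (String × Int)) :
    PySem.List.min2? xs (fun e => e.2) (fun e => order.getD e.1 0) = xs.foldl (pvGmin order) none := by
  unfold PySem.List.min2?
  congr 1
  funext st x
  cases st <;> simp [pvGmin, pvOrd]
lemma pvLt_trans_not (order : PySem.Dict String Int) (a b c : String × Int)
    (h1 : ¬ pvLt order b a) (h2 : ¬ pvLt order c b) : ¬ pvLt order c a := by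
  simp only [pvLt, not_or, not_and, not_lt] at *; omega
lemma pvLt_not_of (order : PySem.Dict String Int) (x m p : String × Int)
    (h1 : ¬ pvLt order x m) (h2 : pvLt order x p) : ¬ pvLt order p m := by
  simp only [pvLt, not_or, not_and, not_lt] at h1 ⊢
  rcases h2 with h | ⟨he, ho⟩ <;> omega

lemma pvCond_iff (order : PySem.Dict String Int) (x q : String × Int) :
    ((decide (x.2 < q.2) || !decide (q.2 < x.2) && decide (pvOrd order x.1 < pvOrd order q.1)) = true)
      ↔ pvLt order x q := by
  simp only [Bool.or_eq_true, Bool.and_eq_true, Bool.not_eq_true', decide_eq_true_eq,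
    decide_eq_false_iff_not, pvLt, not_lt]
  constructor
  · rintro (h | ⟨h1, h2⟩)
    · exact Or.inl h
    · by_cases he : x.2 = q.2
      · exact Or.inr ⟨he, h2⟩
      · exact Or.inl (by omega)
  · rintro (h | ⟨h1, h2⟩)
    · exact Or.inl h
    · exact Or.inr ⟨by omega, h2⟩

lemma pvFold_char (order : PySem.Dict String Int) :
    ∀ (xs : List (String × Int)) (st : Option (String × Int)),
      (xs.foldl (pvGmin order) st = none → (xs = [] ∧ st = none)) ∧
      (∀ m, xs.foldl (pvGmin order) st = some m →
        ((st = some m ∨ m ∈ xs) ∧ (∀ x ∈ xs, ¬ pvLt order x m) ∧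
          (∀ p, st = some p → ¬ pvLt order p m))) := by
  intro xs
  induction xs with
  | nil =>
    intro st
    refine ⟨fun h => ⟨rfl, h⟩, fun m h => ?_⟩
    simp only [List.foldl_nil] at h
    exact ⟨Or.inl h, by simp, fun p hp => by rw [hp] at h; cases h; simp [pvLt]⟩
  | cons x t ih =>
    intro st
    have hcond : ∀ q : String × Int,
        ((decide (x.2 < q.2) || !decide (q.2 < x.2) && decide (pvOrd order x.1 < pvOrd order q.1)) = true)
          ↔ pvLt order x q := fun q => pvCond_iff order x q
    constructor
    · intro h
      simp only [List.foldl_cons] at h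
      have h2 := ((ih (pvGmin order st x)).1 h).2
      cases st with
      | none => exact absurd h2 (by simp [pvGmin])
      | some q => simp only [pvGmin] at h2; split at h2 <;> cases h2
    · intro m h
      simp only [List.foldl_cons] at h
      obtain ⟨hmem, hmin, hst⟩ := (ih (pvGmin order st x)).2 m h
      -- facts about the step pvGmin st x
      have hxm : ¬ pvLt order x m := by
        cases st with
        | none =>
          have : pvGmin order none x = some x := rfl
          exact hst x this
        | some q =>
          by_cases hc : pvLt order x q
          · have : pvGmin order (some q) x = some x := by
              simp only [pvGmin]; rw [if_pos ((hcond q).2 hc)]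
            exact hst x this
          · have hq : pvGmin order (some q) x = some q := by
              simp only [pvGmin]
              rw [if_neg (fun hh => hc ((hcond q).1 hh))]
            have hqm := hst q hq
            exact pvLt_trans_not order m q x hqm hc
      refine ⟨?_, ?_, ?_⟩
      · rcases hmem with hm | hm
        · cases st with
          | none =>
            have : pvGmin order none x = some x := rfl
            rw [this] at hm; cases hm
            exact Or.inr (List.mem_cons_self)
          | some q =>
            simp only [pvGmin] at hm
            split at hm
            · cases hm; exact Or.inr (List.mem_cons_self)
            · cases hm; exact Or.inl rfl
        · exact Or.inr (List.mem_cons_of_mem _ hm)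
      · intro y hy
        rcases List.mem_cons.1 hy with rfl | hyt
        · exact hxm
        · exact hmin y hyt
      · intro q hq
        subst hq
        by_cases hc : pvLt order x q
        · exact pvLt_not_of order x m q hxm hc
        · have hq' : pvGmin order (some q) x = some q := by
            simp only [pvGmin]
            rw [if_neg (fun hh => hc ((hcond q).1 hh))]
          exact hst q hq'

lemma pvOrder_concat (xs : List String) (x : String) :
    pvOrder (xs ++ [x]) = (pvOrder xs).insert x (xs.length : Int) := by
  simp [pvOrder, PySem.List.enumerate_append, List.foldl_append, PySem.List.enumerate_cons,
    PySem.List.enumerate_nil]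

lemma pvOrder_spec (cands : List String) :
    ∀ h ∈ cands, ∃ i : Nat, i < cands.length ∧ cands[i]? = some h ∧
      (pvOrder cands).getD h 0 = (i : Int) := by
  induction cands using List.reverseRecOn with
  | nil => intro h hh; cases hh
  | append_singleton xs x ih =>
    intro h hh
    rw [pvOrder_concat]
    by_cases hx : h = x
    · subst hx
      refine ⟨xs.length, by simp, by simp, ?_⟩
      rw [PySem.Dict.getD_insert_self]
    · have hh' : h ∈ xs := by
        rcases List.mem_append.1 hh with h1 | h1
        · exact h1
        · simp at h1; exact absurd h1 hx
      obtain ⟨i, hi, hget, hval⟩ := ih h hh'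
      refine ⟨i, by simp; omega, ?_, ?_⟩
      · rw [List.getElem?_append_left hi]; exact hget
      · rw [PySem.Dict.getD_insert_of_ne _ _ _ hx]; exact hval

lemma pvOrder_inj (cands : List String) :
    ∀ a ∈ cands, ∀ b ∈ cands,
      (pvOrder cands).getD a 0 = (pvOrder cands).getD b 0 → a = b := by
  intro a ha b hb heq
  obtain ⟨i, hi, hgi, hvi⟩ := pvOrder_spec cands a ha
  obtain ⟨j, hj, hgj, hvj⟩ := pvOrder_spec cands b hb
  rw [hvi, hvj] at heq
  have : i = j := by exact_mod_cast heq
  subst this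
  rw [hgi] at hgj
  exact Option.some.inj hgj

lemma pvLoop_eq (cands : List String) (pc : PySem.Dict (String × String) Int) :
    ∀ (fuel : Nat) (sel : List String) (selset : PySem.Set String) (rem : List (String × Int)),
      (∀ h, PySem.Set.contains selset h = sel.contains h) →
      rem = ((PySem.List.dedup cands).filter (fun h => !sel.contains h)).map
              (fun h => (h, pvAdded pc sel h)) →
      pvALoop cands (pvOrder cands) pc fuel sel selset =
        pvBLoop (pvOrder cands) pc fuel sel rem := by
  intro fuel
  induction fuel with
  | zero => intro sel selset rem _ _; rfl
  | succ n ih =>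
    intro sel selset rem hss hrem
    set order := pvOrder cands with horder
    set f : String → String × Int := fun h => (h, pvAdded pc sel h) with hf
    set L1 : List String := cands.filter (fun h => !sel.contains h) with hL1
    set L2 : List String := (PySem.List.dedup cands).filter (fun h => !sel.contains h) with hL2
    -- A's scan equals the min-fold over L1.map f
    have hA : (cands.foldl
        (fun (st : Option (String × Int)) h =>
          if PySem.Set.contains selset h then st
          else
            let added := sel.foldl (fun acc s => acc + pc.getD (pvPair h s) 0) 0
            match st with
            | none => some (h, added)
            | some (b, ba) =>
              if added < ba ∨ (added = ba ∧ order.getD h 0 < order.getD b 0) then some (h, added)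
              else some (b, ba))
        none) = (L1.map f).foldl (pvGmin order) none := by
      have step_eq : (fun (st : Option (String × Int)) h =>
          if PySem.Set.contains selset h then st
          else
            let added := sel.foldl (fun acc s => acc + pc.getD (pvPair h s) 0) 0
            match st with
            | none => some (h, added)
            | some (b, ba) =>
              if added < ba ∨ (added = ba ∧ order.getD h 0 < order.getD b 0) then some (h, added)
              else some (b, ba)) = (fun st h =>
          if (!sel.contains h) then pvGmin order st (f h) else st) := by
        funext st h
        rw [hss h]
        cases hc : sel.contains h with
        | true => simp
        | false =>
          simp only [Bool.not_false, if_true]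
          cases st with
          | none => rfl
          | some m =>
            obtain ⟨b, ba⟩ := m
            show (if pvAdded pc sel h < ba ∨ (pvAdded pc sel h = ba ∧ order.getD h 0 < order.getD b 0)
                  then some (h, pvAdded pc sel h) else some (b, ba)) = pvGmin order (some (b, ba)) (f h)
            simp only [pvGmin, hf]
            by_cases hP : pvLt order (h, pvAdded pc sel h) (b, ba)
            · rw [if_pos ((pvCond_iff order (h, pvAdded pc sel h) (b, ba)).mpr hP)]
              exact if_pos hP
            · rw [if_neg (fun hh => hP ((pvCond_iff order (h, pvAdded pc sel h) (b, ba)).mp hh))]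
              exact if_neg hP
      rw [step_eq, PySem.List.foldl_if_eq_foldl_filter, ← hL1, ← List.foldl_map]
    have hmemeq : ∀ y, y ∈ L1.map f ↔ y ∈ L2.map f := by
      intro y
      simp only [List.mem_map, hL1, hL2, List.mem_filter, PySem.List.mem_dedup]
    have hchar := fun (xs : List (String × Int)) => pvFold_char order xs none
    rcases hOut : (L1.map f).foldl (pvGmin order) none with _ | ⟨b, a⟩
    · -- no remaining candidate on either side: both loops stop
      have hL2nil : L2.map f = [] := by
        have hL1nil : L1.map f = [] := ((hchar _).1 hOut).1
        rcases hx : L2.map f with _ | ⟨y, ys⟩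
        · rfl
        · exfalso
          have hy : y ∈ L1.map f := (hmemeq y).2 (by rw [hx]; exact List.mem_cons_self)
          rw [hL1nil] at hy; cases hy
      show pvALoop cands order pc (n + 1) sel selset = pvBLoop order pc (n + 1) sel rem
      simp only [pvALoop, pvBLoop]
      rw [hA, hOut, pvMin2_eq_fold, hrem, hL2nil]
      rfl
    · -- both sides pick the same hub b
      have hBOut : (L2.map f).foldl (pvGmin order) none = some (b, a) := by
        rcases hx : (L2.map f).foldl (pvGmin order) none with _ | ⟨b2, a2⟩
        · exfalso
          have hL2nil : L2.map f = [] := ((hchar _).1 hx).1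
          have hm1 : (b, a) ∈ L1.map f := by
            rcases ((hchar _).2 (b, a) hOut).1 with h | h
            · cases h
            · exact h
          have := (hmemeq _).1 hm1
          rw [hL2nil] at this; cases this
        · obtain ⟨hm1, hmin1, -⟩ := (hchar _).2 (b, a) hOut
          obtain ⟨hm2, hmin2, -⟩ := (hchar _).2 (b2, a2) hx
          replace hm1 : (b, a) ∈ L1.map f := by
            rcases hm1 with h | h
            · cases h
            · exact h
          replace hm2 : (b2, a2) ∈ L2.map f := by
            rcases hm2 with h | h
            · cases h
            · exact h
          have hnl1 : ¬ pvLt order (b2, a2) (b, a) := hmin1 _ ((hmemeq _).2 hm2)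
          have hnl2 : ¬ pvLt order (b, a) (b2, a2) := hmin2 _ ((hmemeq _).1 hm1)
          have hkey : pvOrd order b = pvOrd order b2 := by
            simp only [pvLt, not_or, not_and, not_lt] at hnl1 hnl2
            omega
          obtain ⟨h1, hh1, hfe1⟩ := List.mem_map.1 hm1
          obtain ⟨h2', hh2, hfe2⟩ := List.mem_map.1 hm2
          rw [hf] at hfe1 hfe2
          have hb1 : h1 = b := congrArg Prod.fst hfe1
          have hb2 : h2' = b2 := congrArg Prod.fst hfe2
          have hc1 : b ∈ cands := hb1 ▸ (List.mem_filter.1 (hL1 ▸ hh1)).1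
          have hc2 : b2 ∈ cands := by
            have := (List.mem_filter.1 (hL2 ▸ hh2)).1
            exact hb2 ▸ ((PySem.List.mem_dedup cands h2').1 this)
          have hbb : b = b2 := pvOrder_inj cands b hc1 b2 hc2 hkey
          subst hbb
          have : a = a2 := by
            have e1 : a = pvAdded pc sel b := (congrArg Prod.snd hfe1).symm.trans (by rw [hb1])
            have e2 : a2 = pvAdded pc sel b := (congrArg Prod.snd hfe2).symm.trans (by rw [hb2])
            rw [e1, e2]
          rw [this]
      show pvALoop cands order pc (n + 1) sel selset = pvBLoop order pc (n + 1) sel rem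
      simp only [pvALoop, pvBLoop]
      rw [hA, hOut, pvMin2_eq_fold, hrem, hBOut]
      -- recurse with the updated invariants
      have hss' : ∀ h, PySem.Set.contains (PySem.Set.add selset b) h = (sel ++ [b]).contains h := by
        intro h
        have hssL : ∀ h, List.contains selset h = sel.contains h := hss
        show List.contains (if List.contains selset b = true then selset else selset ++ [b]) h = _
        by_cases hcb : List.contains selset b = true
        · rw [if_pos hcb, hssL]
          have hsb : sel.contains b = true := by rw [← hssL]; exact hcb
          simp only [List.contains_eq_mem, List.mem_append, List.mem_singleton] at *
          by_cases hhb : h = b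
          · subst hhb; simp [hsb]
          · simp [hhb]
        · rw [if_neg hcb]
          simp only [List.contains_eq_mem, List.mem_append, List.mem_singleton] at *
          by_cases hhb : h = b
          · subst hhb; simp
          · simp [hhb, hssL h]
      have hrem' : ((L2.map f).filter (fun e => e.1 != b)).map
            (fun e => (e.1, e.2 + pc.getD (pvPair e.1 b) 0)) =
          ((PySem.List.dedup cands).filter (fun h => !(sel ++ [b]).contains h)).map
            (fun h => (h, pvAdded pc (sel ++ [b]) h)) := by
        rw [List.filter_map, List.map_map]
        have hpf : ((fun (e : String × Int) => e.1 != b) ∘ f) = (fun h => h != b) := rfl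
        rw [hpf, hL2, List.filter_filter]
        have hfilt : ∀ a' ∈ PySem.List.dedup cands,
            ((a' != b) && !sel.contains a') = (!(sel ++ [b]).contains a') := by
          intro a' _
          simp only [List.contains_eq_mem, List.mem_append, List.mem_singleton, bne]
          by_cases hab : a' = b
          · subst hab; simp
          · simp [hab]
        rw [List.filter_congr hfilt]
        have hmf : ((fun (e : String × Int) => (e.1, e.2 + pc.getD (pvPair e.1 b) 0)) ∘ f) =
            (fun h => (h, pvAdded pc (sel ++ [b]) h)) := by
          funext h
          simp [hf, pvAdded, List.foldl_append]
        rw [hmf]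
      have := ih (sel ++ [b]) (PySem.Set.add selset b)
        (((PySem.List.dedup cands).filter (fun h => !(sel ++ [b]).contains h)).map
          (fun h => (h, pvAdded pc (sel ++ [b]) h))) hss' rfl
      show pvALoop cands order pc n (sel ++ [b]) (PySem.Set.add selset b) =
        pvBLoop order pc n (sel ++ [b])
          (((List.map f L2).filter (fun e => e.1 != b)).map
            (fun e => (e.1, e.2 + pc.getD (pvPair e.1 b) 0)))
      rw [hrem']
      exact this

lemma pvPorts_eq (triples : List (String × String × String)) (cands : List String) (k : Int) :
    greedy_pick_disconnected_hubs triples cands k =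
      greedy_pick_disconnected_hubs_alt triples cands k := by
  unfold greedy_pick_disconnected_hubs greedy_pick_disconnected_hubs_alt
  by_cases hk : (cands.length : Int) ≤ k
  · rw [if_pos hk, if_pos hk]
  · rw [if_neg hk, if_neg hk]
    cases cands with
    | nil => rfl
    | cons c0 rest =>
      show pvALoop (c0 :: rest) (pvOrder (c0 :: rest)) (pvPairCount triples (c0 :: rest))
          (k - 1).toNat [c0] (PySem.Set.add PySem.Set.empty c0) =
        pvBLoop (pvOrder (c0 :: rest)) (pvPairCount triples (c0 :: rest)) (k - 1).toNat [c0]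
          (((PySem.List.dedup (c0 :: rest)).filter (fun h => h != c0)).map
            (fun h => (h, (pvPairCount triples (c0 :: rest)).getD (pvPair h c0) 0)))
      have hrem0 : (((PySem.List.dedup (c0 :: rest)).filter (fun h => h != c0)).map
            (fun h => (h, (pvPairCount triples (c0 :: rest)).getD (pvPair h c0) 0))) =
          (((PySem.List.dedup (c0 :: rest)).filter (fun h => !([c0].contains h))).map
            (fun h => (h, pvAdded (pvPairCount triples (c0 :: rest)) [c0] h))) := by
        rw [List.filter_congr (fun a _ => by
          simp only [List.contains_eq_mem, List.mem_singleton, bne]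
          rcases eq_or_ne a c0 with h | h
          · subst h; simp
          · simp [h] : ∀ a ∈ PySem.List.dedup (c0 :: rest),
            (a != c0) = (!([c0].contains a)))]
        exact List.map_congr_left (fun a _ => by simp [pvAdded])
      rw [hrem0]
      exact pvLoop_eq (c0 :: rest) (pvPairCount triples (c0 :: rest)) (k - 1).toNat [c0]
        (PySem.Set.add PySem.Set.empty c0) _ (fun h => rfl) rfl

-- ===== VERDICT (by name: the statement is the Claim_ definition above) =====
theorem greedy_pick_disconnected_hubs_spec : Claim_equal_greedy_pick_disconnected_hubs := by
  intro triples candidate_hubs final_k _ _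
  unfold Spec_greedy_pick_disconnected_hubs
  exact pvPorts_eq triples candidate_hubs final_k
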